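-- pv_equiv track=rewrite | github.com/posl/comment_recommendation | script/split_gen/2_time/zh/133_A/7.py | func
-- ===== SOURCE A (Python) =====
-- def func(n, k):
--     # dp[i][j]表示前i个球中有j个蓝球的方案数
--     dp = [[0 for i in range(k+1)] for j in range(n+1)]
--     dp[1][1] = 1
--     dp[1][0] = 1
--     for i in range(2, n+1):
--         for j in range(k+1):
--             if j == 0:
--                 dp[i][j] = dp[i-1][j+1]
--             elif j == k:
--                 dp[i][j] = dp[i-1][j-1]
--             else:
--                 dp[i][j] = dp[i-1][j+1] + dp[i-1][j-1]
--     return dp[n][k]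
-- ===== SOURCE B (Python) =====
-- def func(n, k):
--     # Closed form by the reflection principle: the table counts +/-1 walks of
--     # length n-1 confined to [0, k] (reflections at the two walls), starting at
--     # 0 or 1 and ending at k.  Summing signed mirror images of the endpoint
--     # over the reflection group of the strip (period k+2) turns the count into
--     # a signed sum of binomial coefficients C(n-1, u) taken at two residue
--     # classes of u modulo k+2; the row C(n-1, .) is built incrementally.
--     s = n - 1
--     w = k + 2
--     plus = []
--     minus = []
--     for a in (0, 1):
--         if (s + k - a) % 2 == 0:
--             plus.append(((s + k - a) // 2) % w)
--             minus.append(((s - 2 - k - a) // 2) % w)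
--     total = 0
--     c = 1                      # c = C(s, u)
--     for u in range(s + 1):
--         r = u % w
--         if r in plus:
--             total += c
--         if r in minus:
--             total -= c
--         c = c * (s - u) // (u + 1)
--     return total
-- ===== Notes on version B (the rewrite author's own statement) =====
-- stated objective: faster
-- what changed: Replaced A's (n+1)x(k+1) dynamic-programming table by a reflection-principle closed form: the count is a signed sum of binomial coefficients C(n-1,u) over two residue classes of u mod k+2, computed in one incremental pass over the binomial row; Pre_ excludes n<1 or k<1, where A raises IndexError.
import Mathlib
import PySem

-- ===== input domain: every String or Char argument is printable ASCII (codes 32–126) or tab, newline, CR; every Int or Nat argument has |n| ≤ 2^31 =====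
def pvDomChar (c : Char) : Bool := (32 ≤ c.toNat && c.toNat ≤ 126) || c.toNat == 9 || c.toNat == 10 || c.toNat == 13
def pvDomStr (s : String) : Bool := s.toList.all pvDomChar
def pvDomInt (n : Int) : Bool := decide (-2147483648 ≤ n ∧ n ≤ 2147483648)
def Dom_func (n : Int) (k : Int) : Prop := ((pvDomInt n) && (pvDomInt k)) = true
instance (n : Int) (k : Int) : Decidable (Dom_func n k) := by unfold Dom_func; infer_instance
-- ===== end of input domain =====

-- B replaces A's (n+1)×(k+1) DP table by a reflection-principle closed form: a signed
-- sum of binomial coefficients C(n-1,u) over two residue classes of u mod k+2, built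
-- in one incremental pass over the binomial row.

-- ===== PORT A =====
-- dp[i][j] = dp.getD i [] |>.getD j 0; Python's in-place element assignment dp[i][j] = v:
def pySet2 (dp : List (List Int)) (i j : Nat) (v : Int) : List (List Int) :=
  dp.set i ((dp.getD i []).set j v)

-- the body of A's inner loop: the three-branch rule reading row i-1
def ruleA (K : Nat) (prev : List Int) (j : Nat) : Int :=
  if j = 0 then prev.getD (j+1) 0
  else if j = K then prev.getD (j-1) 0
  else prev.getD (j+1) 0 + prev.getD (j-1) 0

def innerStep (K i : Nat) (d : List (List Int)) (j : Nat) : List (List Int) :=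
  pySet2 d i j (ruleA K (d.getD (i-1) []) j)

def outerStep (K : Nat) (dp : List (List Int)) (i : Nat) : List (List Int) :=
  (List.range (K+1)).foldl (innerStep K i) dp

def func (n : Int) (k : Int) : Int :=
  let N := n.toNat
  let K := k.toNat
  let dp0 : List (List Int) := List.replicate (N+1) (List.replicate (K+1) (0:Int))
  let dp1 := pySet2 dp0 1 1 1          -- dp[1][1] = 1
  let dp2 := pySet2 dp1 1 0 1          -- dp[1][0] = 1
  let dp := (List.range' 2 (N-1)).foldl (outerStep K) dp2   -- for i in range(2, n+1)
  (dp.getD N []).getD K 0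

-- ===== PORT B =====
-- 'for a in (0, 1): if (s+k-a) % 2 == 0: plus.append(...); minus.append(...)'
def pmLists (s k w : Int) : List Int × List Int :=
  [(0:Int), 1].foldl (fun (pm : List Int × List Int) (a : Int) =>
    if PySem.Int.mod (s + k - a) 2 = 0 then
      (pm.1 ++ [PySem.Int.mod (PySem.Int.floordiv (s + k - a) 2) w],
       pm.2 ++ [PySem.Int.mod (PySem.Int.floordiv (s - 2 - k - a) 2) w])
    else pm) ([], [])

-- the body of 'for u in range(s+1)': state (total, c)
def bStep (s w : Int) (plus minus : List Int) (tc : Int × Int) (u : Int) : Int × Int :=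
  let r := PySem.Int.mod u w
  let t1 := if plus.contains r then tc.1 + tc.2 else tc.1
  let t2 := if minus.contains r then t1 - tc.2 else t1
  (t2, PySem.Int.floordiv (tc.2 * (s - u)) (u + 1))

def func_alt (n : Int) (k : Int) : Int :=
  let s := n - 1
  let w := k + 2
  let pm := pmLists s k w
  let res := (PySem.List.pyRange 0 (s + 1) 1).foldl (bStep s w pm.1 pm.2) (0, 1)
  res.1

-- ===== PRECONDITION & SPEC =====
-- Pre_ excludes exactly the inputs (n < 1 or k < 1) on which Python A raises IndexError.
def Pre_func (n : Int) (k : Int) : Prop := 1 ≤ n ∧ 1 ≤ k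
instance (n : Int) (k : Int) : Decidable (Pre_func n k) := by unfold Pre_func; infer_instance
def pvWitness_func : Int × Int := (4, 2)

def Spec_func (n : Int) (k : Int) (out : Int) : Prop := out = func_alt n k
instance (n : Int) (k : Int) (out : Int) : Decidable (Spec_func n k out) := by unfold Spec_func; infer_instance

-- ===== CLAIM (what is proved, stated in full; the proofs are below) =====
def Claim_equal_func : Prop := ∀ (n : Int) (k : Int), Dom_func n k → Pre_func n k → Spec_func n k (func n k)

-- ===== LEMMAS AND PROOFS =====

-- the mathematical row sequence: vrow K i = dp[i+1] of A
def vrow (K : Nat) : Nat → Nat → Int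
  | 0, j => if j ≤ 1 then 1 else 0
  | i+1, j =>
    if j = 0 then vrow K i 1
    else if j = K then vrow K i (K-1)
    else vrow K i (j+1) + vrow K i (j-1)

-- generic list helpers
theorem getD_set_self {α : Type} (l : List α) (i : Nat) (a d : α) :
    (l.set i a).getD i d = if i < l.length then a else d := by
  by_cases h : i < l.length
  · simp [List.getD_eq_getElem?_getD, h]
  · have he : l.set i a = l := List.set_eq_of_length_le (by omega)
    rw [he, if_neg h, List.getD_eq_getElem?_getD, List.getElem?_eq_none (by omega),
      Option.getD_none]

theorem getD_set_ne {α : Type} (l : List α) {i j : Nat} (h : i ≠ j) (a d : α) :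
    (l.set i a).getD j d = l.getD j d := by
  simp [List.getD_eq_getElem?_getD, List.getElem?_set_ne h]

-- ===== A-side fold invariant =====
theorem innerFold_spec (K i : Nat) (hi : 1 ≤ i) :
    ∀ (L : List Nat) (dp : List (List Int)),
      (∀ j ∈ L, j < (dp.getD i []).length) →
      (L.foldl (innerStep K i) dp).length = dp.length ∧
      (∀ r, r ≠ i → (L.foldl (innerStep K i) dp).getD r [] = dp.getD r []) ∧
      ((L.foldl (innerStep K i) dp).getD i []).length = (dp.getD i []).length ∧
      (∀ j, ((L.foldl (innerStep K i) dp).getD i []).getD j 0 =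
        if j ∈ L then ruleA K (dp.getD (i-1) []) j else (dp.getD i []).getD j 0) := by
  intro L
  induction L with
  | nil =>
    intro dp _
    exact ⟨rfl, fun r _ => rfl, rfl, fun j => by simp⟩
  | cons j L ihL =>
    intro dp hLdp
    have hjlen : j < (dp.getD i []).length := hLdp j (by simp)
    have hilt : i < dp.length := by
      by_contra hc
      have hnil : dp.getD i [] = [] := by
        rw [List.getD_eq_getElem?_getD, List.getElem?_eq_none (by omega), Option.getD_none]
      rw [hnil] at hjlen; simp at hjlen
    set v := ruleA K (dp.getD (i-1) []) j with hv
    have hfold : (j :: L).foldl (innerStep K i) dp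
        = L.foldl (innerStep K i) (innerStep K i dp j) := rfl
    set d1 := innerStep K i dp j with hd1
    have hd1len : d1.length = dp.length := by simp [hd1, innerStep, pySet2]
    have hd1r : ∀ r, r ≠ i → d1.getD r [] = dp.getD r [] := by
      intro r hr
      simp only [hd1, innerStep, pySet2]
      exact getD_set_ne _ (fun h => hr h.symm) _ _
    have hd1i : d1.getD i [] = (dp.getD i []).set j v := by
      simp only [hd1, innerStep, pySet2]
      rw [getD_set_self, if_pos hilt]
    have hd1ilen : (d1.getD i []).length = (dp.getD i []).length := by
      rw [hd1i, List.length_set]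
    obtain ⟨p1, p2, p3, p4⟩ := ihL d1 (fun j' hj' => by
      rw [hd1ilen]; exact hLdp j' (by simp [hj']))
    rw [hfold]
    refine ⟨p1.trans hd1len, ?_, p3.trans hd1ilen, ?_⟩
    · intro r hr; rw [p2 r hr, hd1r r hr]
    · intro j'
      rw [p4 j', hd1r _ (by omega), hd1i]
      by_cases hmem : j' ∈ L
      · rw [if_pos hmem, if_pos (by simp [hmem])]
      · rw [if_neg hmem]
        by_cases hjj : j' = j
        · subst hjj
          rw [if_pos (by simp), getD_set_self, if_pos hjlen]
        · rw [getD_set_ne _ (fun h => hjj h.symm),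
            if_neg (by simp [List.mem_cons, hjj, hmem])]

theorem ruleA_vrow (K : Nat) (hK : 1 ≤ K) (prev : List Int) (i : Nat)
    (hprev : ∀ t, t ≤ K → prev.getD t 0 = vrow K i t) (j : Nat) (hj : j ≤ K) :
    ruleA K prev j = vrow K (i+1) j := by
  conv_rhs => rw [vrow]
  unfold ruleA
  by_cases h0 : j = 0
  · rw [if_pos h0, if_pos h0, h0, hprev 1 hK]
  · rw [if_neg h0, if_neg h0]
    by_cases hKj : j = K
    · rw [if_pos hKj, if_pos hKj, hprev (j-1) (by omega), hKj]
    · rw [if_neg hKj, if_neg hKj, hprev (j+1) (by omega), hprev (j-1) (by omega)]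

def DPInv (N K : Nat) (dp : List (List Int)) (i : Nat) : Prop :=
  dp.length = N+1 ∧ (∀ r, r ≤ N → (dp.getD r []).length = K+1) ∧
  (∀ t, t ≤ K → (dp.getD i []).getD t 0 = vrow K (i-1) t)

theorem outerFold_spec (N K : Nat) (hK : 1 ≤ K) :
    ∀ (m a : Nat) (dp : List (List Int)), 1 ≤ a → a + m ≤ N → DPInv N K dp a →
      DPInv N K ((List.range' (a+1) m).foldl (outerStep K) dp) (a+m) := by
  intro m
  induction m with
  | zero => intro a dp _ _ h; simpa using h
  | succ m ihm =>
    intro a dp ha ham hInv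
    rw [List.range'_succ]
    simp only [List.foldl_cons]
    obtain ⟨hlen, hrows, hrow⟩ := hInv
    have ha1N : a + 1 ≤ N := by omega
    obtain ⟨q1, q2, q3, q4⟩ := innerFold_spec K (a+1) (by omega) (List.range (K+1)) dp
      (fun j hj => by rw [hrows (a+1) ha1N]; simpa using hj)
    have hInv' : DPInv N K (outerStep K dp (a+1)) (a+1) := by
      simp only [outerStep]
      refine ⟨q1.trans hlen, ?_, ?_⟩
      · intro r hr
        by_cases hri : r = a+1
        · rw [hri, q3]; exact hrows (a+1) ha1N
        · rw [q2 r hri]; exact hrows r hr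
      · intro t ht
        rw [q4 t, if_pos (by simp; omega)]
        have : ruleA K (dp.getD (a+1-1) []) t = vrow K ((a-1)+1) t := by
          rw [show a+1-1 = a from by omega]
          exact ruleA_vrow K hK (dp.getD a []) (a-1) hrow t ht
        rw [this, show (a-1)+1 = a from by omega, show a+1-1 = a from by omega]
    have := ihm (a+1) (outerStep K dp (a+1)) (by omega) (by omega) hInv'
    rw [show a + (m+1) = (a+1) + m from by omega]
    exact this

-- ===== glue: A =====
theorem func_eq_vrow (n k : Int) (hn : 1 ≤ n) (hk : 1 ≤ k) :
    func n k = vrow k.toNat (n.toNat - 1) k.toNat := by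
  have hN : 1 ≤ n.toNat := by omega
  have hK : 1 ≤ k.toNat := by omega
  simp only [func]
  set N := n.toNat with hNdef
  set K := k.toNat with hKdef
  set dp0 : List (List Int) := List.replicate (N+1) (List.replicate (K+1) (0:Int)) with hdp0
  set dp2 := pySet2 (pySet2 dp0 1 1 1) 1 0 1 with hdp2
  have hdp0r : ∀ r, r ≤ N → dp0.getD r [] = List.replicate (K+1) (0:Int) := by
    intro r hr
    rw [hdp0, List.getD_eq_getElem?_getD, List.getElem?_replicate,
      if_pos (by omega), Option.getD_some]
  have hlen2 : dp2.length = N+1 := by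
    simp [hdp2, hdp0, pySet2, List.length_set, List.length_replicate]
  have hrow1 : dp2.getD 1 [] = ((List.replicate (K+1) (0:Int)).set 1 1).set 0 1 := by
    rw [hdp2]
    simp only [pySet2]
    rw [getD_set_self, if_pos (by simp [hdp0, List.length_set]; omega),
      getD_set_self, if_pos (by simp [hdp0]; omega), hdp0r 1 hN]
  have hInit : DPInv N K dp2 1 := by
    refine ⟨hlen2, ?_, ?_⟩
    · intro r hr
      by_cases hr1 : r = 1
      · rw [hr1, hrow1]; simp [List.length_set]
      · rw [hdp2]
        simp only [pySet2]
        rw [getD_set_ne _ (fun h => hr1 h.symm), getD_set_ne _ (fun h => hr1 h.symm),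
          hdp0r r hr]
        simp
    · intro t ht
      rw [hrow1]
      conv_rhs => rw [show (1:Nat) - 1 = 0 from rfl, vrow]
      rcases Nat.lt_or_ge t 2 with h2 | h2
      · interval_cases t
        · rw [getD_set_self, if_pos (by simp [List.length_set])]
          norm_num
        · rw [getD_set_ne _ (by omega), getD_set_self, if_pos (by simp; omega)]
          norm_num
      · rw [getD_set_ne _ (by omega), getD_set_ne _ (by omega),
          List.getD_eq_getElem?_getD, List.getElem?_replicate, if_pos (by omega),
          Option.getD_some, if_neg (by omega)]
  have hmain := outerFold_spec N K hK (N-1) 1 dp2 le_rfl (by omega) hInit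
  rw [show (1:Nat)+1 = 2 from rfl] at hmain
  obtain ⟨-, -, h3⟩ := hmain
  have := h3 K le_rfl
  rw [show 1 + (N-1) = N from by omega] at this
  rw [this, show N - 1 = N - 1 from rfl]

-- ===== the reflection sum =====
-- ind2 W d u = 1 iff 2u ≡ d (mod W): indicator of one mirror-image family
def ind2 (W d u : Int) : Int := if (2 * u - d) % W = 0 then (1:Int) else 0

-- signed image indicator for row i, endpoint j, starts 0 and 1; W = 2k+4
def sig (W i j u : Int) : Int :=
  (ind2 W (i + j) u - ind2 W (i - 2 - j) u) + (ind2 W (i + j - 1) u - ind2 W (i - 3 - j) u)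

def Ssum (k : Int) (i : Nat) (j : Int) : Int :=
  ∑ u ∈ Finset.range (i + 1), (Nat.choose i u : Int) * sig (2*k+4) (i : Int) j (u : Int)

theorem emod_zero_iff (a b : Int) : a % b = 0 ↔ b ∣ a :=
  ⟨Int.dvd_of_emod_eq_zero, Int.emod_eq_zero_of_dvd⟩

theorem ind2_congr (W d d' u : Int) (h : W ∣ (d - d')) : ind2 W d u = ind2 W d' u := by
  unfold ind2
  have hiff : (2 * u - d) % W = 0 ↔ (2 * u - d') % W = 0 := by
    rw [emod_zero_iff, emod_zero_iff]
    constructor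
    · intro h'
      have hh : W ∣ (2 * u - d) + (d - d') := dvd_add h' h
      have he : (2 * u - d) + (d - d') = 2 * u - d' := by ring
      rwa [he] at hh
    · intro h'
      have hh : W ∣ (2 * u - d') - (d - d') := dvd_sub h' h
      have he : (2 * u - d') - (d - d') = 2 * u - d := by ring
      rwa [he] at hh
  rw [if_congr hiff rfl rfl]

theorem ind2_succ (W d u : Int) : ind2 W d (u + 1) = ind2 W (d - 2) u := by
  unfold ind2
  rw [show 2 * (u + 1) - d = 2 * u - (d - 2) from by ring]

theorem ind2_odd (W d u : Int) (hW : (2:Int) ∣ W) (hd : ¬ (2:Int) ∣ d) : ind2 W d u = 0 := by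
  unfold ind2
  rw [if_neg]
  intro h
  have h1 : W ∣ 2 * u - d := Int.dvd_of_emod_eq_zero h
  have h2 : (2:Int) ∣ 2 * u - d := dvd_trans hW h1
  omega

theorem dvd_small (W x : Int) (hW : 0 < W) (h1 : -W < x) (h2 : x < W) : W ∣ x ↔ x = 0 := by
  constructor
  · rintro ⟨m, rfl⟩
    rcases lt_trichotomy m 0 with h | h | h
    · nlinarith
    · simp [h]
    · nlinarith
  · rintro rfl; exact dvd_zero W

theorem ind2_at_zero (W d : Int) : ind2 W d 0 = if W ∣ d then (1:Int) else 0 := by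
  unfold ind2
  rw [show 2 * (0:Int) - d = -d from by ring]
  have : (-d) % W = 0 ↔ W ∣ d := by
    rw [emod_zero_iff, dvd_neg]
  rw [if_congr this rfl rfl]

theorem sig_vanish (W i j u : Int) (h : W ∣ 2*j + 2) : sig W i j u = 0 := by
  unfold sig
  rw [ind2_congr W (i + j) (i - 2 - j) u (by rw [show (i+j) - (i-2-j) = 2*j+2 from by ring]; exact h),
      ind2_congr W (i + j - 1) (i - 3 - j) u (by rw [show (i+j-1) - (i-3-j) = 2*j+2 from by ring]; exact h)]
  ring

theorem sig_step (W i j u : Int) :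
    sig W (i+1) j u + sig W (i+1) j (u+1) = sig W i (j+1) u + sig W i (j-1) u := by
  simp only [sig, ind2_succ]
  ring_nf

theorem choose_step (i : Nat) (g : Nat → Int) :
    (∑ u ∈ Finset.range (i+2), ((i+1).choose u : Int) * g u)
      = ∑ u ∈ Finset.range (i+1), (i.choose u : Int) * (g u + g (u+1)) := by
  have h1 : (∑ u ∈ Finset.range (i+2), ((i+1).choose u : Int) * g u)
      = (∑ u ∈ Finset.range (i+1), ((i+1).choose (u+1) : Int) * g (u+1))
        + ((i+1).choose 0 : Int) * g 0 :=
    Finset.sum_range_succ' _ _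
  have h2 : ∀ u ∈ Finset.range (i+1), ((i+1).choose (u+1) : Int) * g (u+1)
      = (i.choose u : Int) * g (u+1) + (i.choose (u+1) : Int) * g (u+1) := by
    intro u _
    rw [show ((i+1).choose (u+1) : Int) = (i.choose u : Int) + (i.choose (u+1) : Int) from by
      exact_mod_cast congrArg (Nat.cast : Nat → Int) (Nat.choose_succ_succ i u)]
    ring
  have h3 : (∑ u ∈ Finset.range (i+1), (i.choose (u+1) : Int) * g (u+1))
      = (∑ u ∈ Finset.range (i+1), (i.choose u : Int) * g u) - (i.choose 0 : Int) * g 0 := by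
    have ha := Finset.sum_range_succ' (fun u => (i.choose u : Int) * g u) (i+1)
    have hb := Finset.sum_range_succ (fun u => (i.choose u : Int) * g u) (i+1)
    simp only [Nat.choose_succ_self, Nat.cast_zero, zero_mul, add_zero] at hb
    simp only at ha hb
    linarith [ha, hb]
  rw [h1, Finset.sum_congr rfl h2, Finset.sum_add_distrib, h3]
  have h4 : (∑ u ∈ Finset.range (i+1), (i.choose u : Int) * (g u + g (u+1)))
      = (∑ u ∈ Finset.range (i+1), (i.choose u : Int) * g u)
        + ∑ u ∈ Finset.range (i+1), (i.choose u : Int) * g (u+1) := by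
    rw [← Finset.sum_add_distrib]
    exact Finset.sum_congr rfl (fun u _ => by ring)
  rw [h4]
  simp [Nat.choose_zero_right]
  ring

theorem Ssum_step (k : Int) (i : Nat) (j : Int) :
    Ssum k (i+1) j = Ssum k i (j+1) + Ssum k i (j-1) := by
  unfold Ssum
  rw [show i+1+1 = i+2 from rfl,
    show (((i+1 : Nat)) : Int) = (i:Int)+1 from by push_cast; ring,
    choose_step i (fun u => sig (2*k+4) ((i:Int)+1) j (u : Int))]
  · rw [← Finset.sum_add_distrib]
    apply Finset.sum_congr rfl
    intro u _
    push_cast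
    rw [show ((i:Int)+1) = ((i+1 : Nat) : Int) from by push_cast; ring]
    push_cast
    rw [sig_step (2*k+4) (i:Int) j (u:Int)]
    ring

theorem Ssum_base (k : Int) (j : Int) (hk : 1 ≤ k) (hj0 : 0 ≤ j) (hjk : j ≤ k) :
    Ssum k 0 j = (if j = 0 then (1:Int) else 0) + (if j = 1 then (1:Int) else 0) := by
  unfold Ssum
  rw [Finset.sum_range_one]
  simp only [Nat.choose_self, Nat.cast_one, one_mul, CharP.cast_eq_zero]
  unfold sig
  rw [show (0:Int) + j = j from by ring, show (0:Int) - 2 - j = -2-j from by ring,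
      show (0:Int) - 3 - j = -3-j from by ring]
  simp only [ind2_at_zero]
  have hW : 0 < 2*k+4 := by omega
  rw [if_congr (dvd_small _ _ hW (by omega) (by omega)) rfl rfl,
      if_congr (dvd_small _ _ hW (by omega) (by omega)) rfl rfl,
      if_congr (dvd_small _ _ hW (by omega) (by omega)) rfl rfl,
      if_congr (dvd_small _ _ hW (by omega) (by omega)) rfl rfl]
  have e1 : ¬ (-2 - j = 0) := by omega
  have e2 : ¬ (-3 - j = 0) := by omega
  rw [if_neg e1, if_neg e2]
  have e3 : (j - 1 = 0) ↔ (j = 1) := by omega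
  rw [if_congr e3 rfl rfl]
  ring

theorem vrow_eq_Ssum (K : Nat) (hK : 1 ≤ K) :
    ∀ (i : Nat) (j : Nat), j ≤ K → vrow K i j = Ssum (K:Int) i (j:Int) := by
  intro i
  induction i with
  | zero =>
    intro j hj
    rw [Ssum_base (K:Int) (j:Int) (by exact_mod_cast hK) (by positivity) (by exact_mod_cast hj)]
    simp only [vrow]
    by_cases h0 : j = 0
    · subst h0; norm_num
    · by_cases h1 : j = 1
      · subst h1; norm_num
      · rw [if_neg (by omega)]
        rw [if_neg (by exact_mod_cast h0), if_neg (by exact_mod_cast (by omega : ¬ (j:Int) = 1))]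
        ring
  | succ i ih =>
    intro j hj
    rw [Ssum_step]
    conv_lhs => rw [vrow]
    by_cases h0 : j = 0
    · subst h0
      rw [if_pos rfl, ih 1 hK]
      have hz : Ssum (K:Int) i (-1) = 0 := by
        unfold Ssum
        apply Finset.sum_eq_zero
        intro u _
        have hv : sig (2*(K:Int)+4) (i:Int) (-1) (u:Int) = 0 :=
          sig_vanish _ _ _ _ (by norm_num)
        rw [hv]; ring
      norm_num [hz]
    · rw [if_neg h0]
      by_cases hjK : j = K
      · rw [if_pos hjK, ih (K-1) (by omega)]
        have hjc : ((j:Nat):Int) = (K:Int) := by exact_mod_cast hjK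
        rw [hjc]
        have hz : Ssum (K:Int) i ((K:Int) + 1) = 0 := by
          unfold Ssum
          apply Finset.sum_eq_zero
          intro u _
          have hv : sig (2*(K:Int)+4) (i:Int) ((K:Int)+1) (u:Int) = 0 :=
            sig_vanish _ _ _ _ (by rw [show 2*((K:Int)+1)+2 = 2*(K:Int)+4 from by ring])
          rw [hv]; ring
        rw [hz]
        have hc : (((K - 1 : Nat)) : Int) = (K:Int) - 1 := by omega
        rw [hc]
        ring
      · rw [if_neg hjK, ih (j+1) (by omega), ih (j-1) (by omega)]
        have h1 : (((j + 1 : Nat)) : Int) = (j:Int) + 1 := by push_cast; ring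
        have h2 : (((j - 1 : Nat)) : Int) = (j:Int) - 1 := by omega
        rw [h1, h2]

-- ===== B-side: the loop computes Ssum =====
theorem key_ind2 (w d u : Int) (hw : 0 < w) (hd : (2:Int) ∣ d) :
    ind2 (2*w) d u
      = if PySem.Int.mod u w = PySem.Int.mod (PySem.Int.floordiv d 2) w then (1:Int) else 0 := by
  obtain ⟨e, rfl⟩ := hd
  have hfd : PySem.Int.floordiv (2*e) 2 = e := by
    rw [PySem.Int.floordiv_eq_ediv_of_pos (by norm_num)]
    omega
  rw [hfd, PySem.Int.mod_eq_emod_of_pos hw, PySem.Int.mod_eq_emod_of_pos hw]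
  unfold ind2
  apply if_congr _ rfl rfl
  rw [emod_zero_iff, Int.emod_eq_emod_iff_emod_sub_eq_zero, emod_zero_iff,
    show 2*u - 2*e = 2*(u - e) from by ring]
  exact mul_dvd_mul_iff_left (by norm_num : (2:Int) ≠ 0)

theorem fold_inv (s k : Int) (hs : 0 ≤ s) (rp rm : Int)
    (hstep : ∀ u : Int,
      ((if PySem.Int.mod u (k+2) = rp then (1:Int) else 0)
        - (if PySem.Int.mod u (k+2) = rm then (1:Int) else 0)) = sig (2*k+4) s k u) :
    ∀ t : Nat, t ≤ s.toNat + 1 →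
      (PySem.List.pyRange 0 (t:Int) 1).foldl (bStep s (k+2) [rp] [rm]) (0, 1)
        = (∑ u ∈ Finset.range t, (Nat.choose s.toNat u : Int) * sig (2*k+4) s k (u:Int),
           (Nat.choose s.toNat t : Int)) := by
  intro t
  induction t with
  | zero =>
    intro _
    rw [show ((0:Nat):Int) = 0 from rfl, PySem.List.pyRange_one_eq_nil le_rfl]
    simp
  | succ t iht =>
    intro ht
    have ht' : t ≤ s.toNat + 1 := by omega
    have htS : t ≤ s.toNat := by omega
    rw [show (((t+1:Nat)):Int) = (t:Int) + 1 from by push_cast; ring,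
      PySem.List.pyRange_one_succ_right (by positivity), List.foldl_append,
      iht ht', List.foldl_cons, List.foldl_nil]
    unfold bStep
    simp only [List.contains_cons, List.contains_nil, Bool.or_false, beq_iff_eq]
    have hs' : s = ((s.toNat : Nat) : Int) := by omega
    have hcup : PySem.Int.floordiv ((Nat.choose s.toNat t : Int) * (s - (t:Int))) ((t:Int) + 1)
        = (Nat.choose s.toNat (t+1) : Int) := by
      rw [show s - (t:Int) = (((s.toNat - t : Nat)) : Int) from by omega,
        show (Nat.choose s.toNat t : Int) * (((s.toNat - t : Nat)) : Int)
          = ((Nat.choose s.toNat t * (s.toNat - t) : Nat) : Int) from by push_cast; ring,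
        show (t:Int) + 1 = (((t+1 : Nat)) : Int) from by push_cast; ring,
        PySem.Int.floordiv_natCast,
        ← Nat.choose_succ_right_eq, Nat.mul_div_cancel _ (Nat.succ_pos t)]
    rw [Finset.sum_range_succ]
    have hst := hstep (t:Int)
    refine Prod.ext ?_ ?_
    · show (if PySem.Int.mod (t:Int) (k+2) = rm
          then (if PySem.Int.mod (t:Int) (k+2) = rp
                then (∑ u ∈ Finset.range t, (Nat.choose s.toNat u : Int) * sig (2*k+4) s k (u:Int))
                      + (Nat.choose s.toNat t : Int)
                else (∑ u ∈ Finset.range t, (Nat.choose s.toNat u : Int) * sig (2*k+4) s k (u:Int)))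
                - (Nat.choose s.toNat t : Int)
          else (if PySem.Int.mod (t:Int) (k+2) = rp
                then (∑ u ∈ Finset.range t, (Nat.choose s.toNat u : Int) * sig (2*k+4) s k (u:Int))
                      + (Nat.choose s.toNat t : Int)
                else (∑ u ∈ Finset.range t, (Nat.choose s.toNat u : Int) * sig (2*k+4) s k (u:Int))))
        = (∑ u ∈ Finset.range t, (Nat.choose s.toNat u : Int) * sig (2*k+4) s k (u:Int))
            + (Nat.choose s.toNat t : Int) * sig (2*k+4) s k (t:Int)
      rw [← hst]
      split_ifs <;> ring
    · exact hcup

theorem alt_eq_Ssum (n k : Int) (hn : 1 ≤ n) (hk : 1 ≤ k) :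
    func_alt n k = Ssum k (n.toNat - 1) k := by
  have hw : (0:Int) < k + 2 := by omega
  have hs : (0:Int) ≤ n - 1 := by omega
  have hW2 : (2:Int) ∣ 2*k+4 := ⟨k+2, by ring⟩
  have hWw : 2*k+4 = 2*(k+2) := by ring
  simp only [func_alt]
  set s := n - 1 with hsdef
  have hSnat : n.toNat - 1 = s.toNat := by omega
  by_cases hpar : (2:Int) ∣ (s + k)
  · have hpm : pmLists s k (k+2)
        = ([PySem.Int.mod (PySem.Int.floordiv (s + k - 0) 2) (k+2)],
           [PySem.Int.mod (PySem.Int.floordiv (s - 2 - k - 0) 2) (k+2)]) := by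
      unfold pmLists
      simp only [List.foldl_cons, List.foldl_nil]
      rw [if_pos (show PySem.Int.mod (s + k - 0) 2 = 0 from by
            rw [PySem.Int.mod_eq_emod_of_pos (by norm_num), emod_zero_iff]; omega),
          if_neg (show ¬ PySem.Int.mod (s + k - 1) 2 = 0 from by
            rw [PySem.Int.mod_eq_emod_of_pos (by norm_num), emod_zero_iff]; omega)]
      simp
    rw [hpm]
    have hstep : ∀ u : Int,
        ((if PySem.Int.mod u (k+2) = PySem.Int.mod (PySem.Int.floordiv (s + k - 0) 2) (k+2) then (1:Int) else 0)
          - (if PySem.Int.mod u (k+2) = PySem.Int.mod (PySem.Int.floordiv (s - 2 - k - 0) 2) (k+2) then (1:Int) else 0))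
          = sig (2*k+4) s k u := by
      intro u
      unfold sig
      rw [ind2_odd (2*k+4) (s + k - 1) u hW2 (by omega),
        ind2_odd (2*k+4) (s - 3 - k) u hW2 (by omega), hWw,
        key_ind2 (k+2) (s + k) u hw (by omega),
        key_ind2 (k+2) (s - 2 - k) u hw (by omega),
        show s + k - 0 = s + k from by ring, show s - 2 - k - 0 = s - 2 - k from by ring]
      ring
    have hmain := fold_inv s k hs _ _ hstep (s.toNat + 1) le_rfl
    rw [show (((s.toNat + 1 : Nat)) : Int) = s + 1 from by omega] at hmain
    rw [hmain]
    simp only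
    unfold Ssum
    rw [hSnat]
    apply Finset.sum_congr rfl
    intro u _
    rw [show ((s.toNat : Nat) : Int) = s from by omega]
  · have hpm : pmLists s k (k+2)
        = ([PySem.Int.mod (PySem.Int.floordiv (s + k - 1) 2) (k+2)],
           [PySem.Int.mod (PySem.Int.floordiv (s - 2 - k - 1) 2) (k+2)]) := by
      unfold pmLists
      simp only [List.foldl_cons, List.foldl_nil]
      rw [if_neg (show ¬ PySem.Int.mod (s + k - 0) 2 = 0 from by
            rw [PySem.Int.mod_eq_emod_of_pos (by norm_num), emod_zero_iff]; omega),
          if_pos (show PySem.Int.mod (s + k - 1) 2 = 0 from by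
            rw [PySem.Int.mod_eq_emod_of_pos (by norm_num), emod_zero_iff]; omega)]
      simp
    rw [hpm]
    have hstep : ∀ u : Int,
        ((if PySem.Int.mod u (k+2) = PySem.Int.mod (PySem.Int.floordiv (s + k - 1) 2) (k+2) then (1:Int) else 0)
          - (if PySem.Int.mod u (k+2) = PySem.Int.mod (PySem.Int.floordiv (s - 2 - k - 1) 2) (k+2) then (1:Int) else 0))
          = sig (2*k+4) s k u := by
      intro u
      unfold sig
      rw [ind2_odd (2*k+4) (s + k) u hW2 (by omega),
        ind2_odd (2*k+4) (s - 2 - k) u hW2 (by omega), hWw,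
        key_ind2 (k+2) (s + k - 1) u hw (by omega),
        key_ind2 (k+2) (s - 3 - k) u hw (by omega),
        show s - 2 - k - 1 = s - 3 - k from by ring]
      ring
    have hmain := fold_inv s k hs _ _ hstep (s.toNat + 1) le_rfl
    rw [show (((s.toNat + 1 : Nat)) : Int) = s + 1 from by omega] at hmain
    rw [hmain]
    simp only
    unfold Ssum
    rw [hSnat]
    apply Finset.sum_congr rfl
    intro u _
    rw [show ((s.toNat : Nat) : Int) = s from by omega]

-- ===== VERDICT (by name: the statement is the Claim_ definition above) =====
theorem func_spec : Claim_equal_func := by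
  intro n k _hdom hpre
  obtain ⟨hn, hk⟩ := hpre
  show func n k = func_alt n k
  have hK : 1 ≤ k.toNat := by omega
  rw [func_eq_vrow n k hn hk, alt_eq_Ssum n k hn hk,
    vrow_eq_Ssum k.toNat hK (n.toNat - 1) k.toNat le_rfl]
  rw [show ((k.toNat : Nat) : Int) = k from by omega]
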